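-- pv_equiv track=rewrite | github.com/JuanCogollo/fundamentos-de-programacion-2022 | modulo12/ejercicio7.py | mover_columnas
-- ===== SOURCE A (Python) =====
-- def mover_columnas(cubo, col, dir):
--     col -= 1
--     size = len(cubo)
--     new_col = []
--     if dir == "+":
--         new_col.append(cubo[-1][col])
--         for fila in range(size - 1):
--             new_col.append(cubo[fila][col])
--     else:
--         for fila in range(1, size):
--             new_col.append(cubo[fila][col])
--         new_col.append(cubo[0][col])
--
--     for i in range(size):
--         cubo[i][col] = new_col[i]
--
--     return cubo
-- ===== SOURCE B (Python) =====
-- def mover_columnas(cubo, col, dir):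
--     c = col - 1
--     if dir == "+":
--         carry = cubo[-1][c]
--         for row in cubo:
--             row[c], carry = carry, row[c]
--     else:
--         first = cubo[0][c]
--         for prev, nxt in zip(cubo, cubo[1:]):
--             prev[c] = nxt[c]
--         cubo[-1][c] = first
--     return cubo
-- ===== Notes on version B (the rewrite author's own statement) =====
-- stated objective: alternative
-- what changed: A materializes the whole rotated column in a new_col list via two index loops and writes it back by index; B never builds the column: for '+' it does one carry-swap pass over the rows (each row's cell swapped with a carry seeded from the last row), for the other direction it shifts each row's cell from the next row via a pairwise zip and finally stores the saved first value into the last row.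
import Mathlib
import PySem

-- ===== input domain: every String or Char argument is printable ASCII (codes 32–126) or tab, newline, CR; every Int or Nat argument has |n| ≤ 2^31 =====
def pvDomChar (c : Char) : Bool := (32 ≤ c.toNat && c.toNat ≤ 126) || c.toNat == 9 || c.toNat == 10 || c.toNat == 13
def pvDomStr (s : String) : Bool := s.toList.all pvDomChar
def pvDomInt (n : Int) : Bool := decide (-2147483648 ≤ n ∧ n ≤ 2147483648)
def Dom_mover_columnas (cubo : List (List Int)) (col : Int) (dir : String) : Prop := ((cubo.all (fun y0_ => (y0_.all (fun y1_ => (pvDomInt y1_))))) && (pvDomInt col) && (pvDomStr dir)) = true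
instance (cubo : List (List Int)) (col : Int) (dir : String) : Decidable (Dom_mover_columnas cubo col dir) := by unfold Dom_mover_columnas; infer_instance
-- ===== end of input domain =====

-- B avoids A's materialized new_col list: one carry-swap pass for "+", a pairwise next-row shift for the
-- other direction. Both Pythons mutate cubo's rows in place the same way; the theorems are about the return value.

-- ===== PORT A =====
def mover_columnas (cubo : List (List Int)) (col : Int) (dir : String) : List (List Int) :=
  let col := col - 1
  let size := cubo.length
  let new_col : List Int :=
    if dir == "+" then
      (PySem.List.pyRange 0 ((size : Int) - 1) 1).foldl
        (fun acc fila => acc ++ [PySem.List.pyGetD (PySem.List.pyGetD cubo fila []) col 0])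
        [PySem.List.pyGetD (PySem.List.pyGetD cubo (-1) []) col 0]
    else
      ((PySem.List.pyRange 1 (size : Int) 1).foldl
          (fun acc fila => acc ++ [PySem.List.pyGetD (PySem.List.pyGetD cubo fila []) col 0]) [])
        ++ [PySem.List.pyGetD (PySem.List.pyGetD cubo 0 []) col 0]
  (PySem.List.pyRange 0 (size : Int) 1).foldl
    (fun c i => PySem.List.pySetD c i
      (PySem.List.pySetD (PySem.List.pyGetD c i []) col (PySem.List.pyGetD new_col i 0))) cubo

-- ===== PORT B =====
def mover_columnas_alt (cubo : List (List Int)) (col : Int) (dir : String) : List (List Int) :=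
  let c := col - 1
  if dir == "+" then
    -- carry-swap pass: row[c], carry = carry, row[c]
    let carry := PySem.List.pyGetD (PySem.List.pyGetD cubo (-1) []) c 0
    (cubo.foldl
      (fun (s : List (List Int) × Int) row =>
        (s.1 ++ [PySem.List.pySetD row c s.2], PySem.List.pyGetD row c 0))
      ([], carry)).1
  else
    -- for prev, nxt in zip(cubo, cubo[1:]): prev[c] = nxt[c]; then cubo[-1][c] = first
    let first := PySem.List.pyGetD (PySem.List.pyGetD cubo 0 []) c 0
    (cubo.zip (PySem.List.slice cubo (some 1) none)).map
      (fun p => PySem.List.pySetD p.1 c (PySem.List.pyGetD p.2 c 0))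
    ++ [PySem.List.pySetD (PySem.List.pyGetD cubo (-1) []) c first]

-- ===== PRECONDITION & SPEC =====
-- Pre_ excludes exactly the inputs where the Python A raises IndexError: an empty matrix, or a row
-- in which column index col-1 (with Python negative-index semantics) is out of range.
def Pre_mover_columnas (cubo : List (List Int)) (col : Int) (dir : String) : Prop :=
  cubo ≠ [] ∧ ∀ row ∈ cubo, PySem.Raise.InRange row.length (col - 1)
instance (cubo : List (List Int)) (col : Int) (dir : String) : Decidable (Pre_mover_columnas cubo col dir) := by unfold Pre_mover_columnas; infer_instance
def pvWitness_mover_columnas : List (List Int) × Int × String := ([[1, 2], [3, 4], [5, 6]], 2, "+")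
def Spec_mover_columnas (cubo : List (List Int)) (col : Int) (dir : String) (out : List (List Int)) : Prop := out = mover_columnas_alt cubo col dir
instance (cubo : List (List Int)) (col : Int) (dir : String) (out : List (List Int)) : Decidable (Spec_mover_columnas cubo col dir out) := by unfold Spec_mover_columnas; infer_instance

-- ===== CLAIM (what is proved, stated in full; the proofs are below) =====
def Claim_equal_mover_columnas : Prop := ∀ (cubo : List (List Int)) (col : Int) (dir : String), Dom_mover_columnas cubo col dir → Pre_mover_columnas cubo col dir → Spec_mover_columnas cubo col dir (mover_columnas cubo col dir)

-- ===== LEMMAS AND PROOFS =====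

-- Reading prefix elements of xs by index over range m is mapping over xs.take m.
lemma map_getD_range {α β : Type} (g : α → β) (dflt : α) :
    ∀ (xs : List α) (m : Nat), m ≤ xs.length →
      (List.range m).map (fun k => g (xs.getD k dflt)) = (xs.take m).map g := by
  intro xs m
  induction m with
  | zero => simp
  | succ m ih =>
    intro h
    have hm : m < xs.length := by omega
    rw [List.range_succ, List.map_append, ih (by omega), List.take_add_one,
      List.getElem?_eq_getElem hm]
    simp only [Option.toList_some, List.map_append, List.map_cons, List.map_nil]
    rw [List.getD_eq_getElem?_getD, List.getElem?_eq_getElem hm, Option.getD_some]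

-- The write-back loop keeps the head untouched when every index is shifted by one.
lemma foldl_keep_head (c v : Int) (w : List Int) :
    ∀ (l : List Nat) (y : List Int) (t : List (List Int)),
      List.foldl (fun (a : List (List Int)) (k : Nat) => PySem.List.pySetD a ((k : Int) + 1)
          (PySem.List.pySetD (PySem.List.pyGetD a ((k : Int) + 1) []) c
            (PySem.List.pyGetD (v :: w) ((k : Int) + 1) 0))) (y :: t) l
      = y :: List.foldl (fun (a : List (List Int)) (k : Nat) => PySem.List.pySetD a (k : Int)
          (PySem.List.pySetD (PySem.List.pyGetD a (k : Int) []) c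
            (PySem.List.pyGetD w (k : Int) 0))) t l := by
  intro l
  induction l with
  | nil => intro y t; rfl
  | cons k l ih =>
    intro y t
    rw [List.foldl_cons, List.foldl_cons]
    have hcast : ((k : Int) + 1) = ((k + 1 : Nat) : Int) := by push_cast; ring
    have hstep : PySem.List.pySetD (y :: t) ((k : Int) + 1)
          (PySem.List.pySetD (PySem.List.pyGetD (y :: t) ((k : Int) + 1) []) c
            (PySem.List.pyGetD (v :: w) ((k : Int) + 1) 0))
        = y :: PySem.List.pySetD t (k : Int)
          (PySem.List.pySetD (PySem.List.pyGetD t (k : Int) []) c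
            (PySem.List.pyGetD w (k : Int) 0)) := by
      simp only [hcast, PySem.List.pySetD_natCast, PySem.List.pyGetD_natCast,
        List.getD_cons_succ, List.set_cons_succ]
    rw [hstep]
    exact ih _ _

-- A's index write-back loop is a zip write-back.
lemma writeback_eq_zip (c : Int) :
    ∀ (xs : List (List Int)) (vs : List Int), vs.length = xs.length →
      (PySem.List.pyRange 0 (xs.length : Int) 1).foldl
        (fun a i => PySem.List.pySetD a i
          (PySem.List.pySetD (PySem.List.pyGetD a i []) c (PySem.List.pyGetD vs i 0))) xs
      = (xs.zip vs).map (fun p => PySem.List.pySetD p.1 c p.2) := by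
  intro xs
  induction xs with
  | nil =>
    intro vs h
    rw [PySem.List.pyRange_one_eq_nil (by simp)]
    simp
  | cons x t ih =>
    intro vs h
    cases vs with
    | nil => simp at h
    | cons v w =>
      rw [PySem.List.pyRange_one, List.foldl_map]
      have hn : (((x :: t).length : Int) - 0).toNat = t.length + 1 := by
        simp
      rw [hn, List.range_succ_eq_map, List.foldl_cons, List.foldl_map]
      simp only [Nat.cast_zero, Int.zero_add, Nat.succ_eq_add_one, Nat.cast_add, Nat.cast_one]
      have step0 : PySem.List.pySetD (x :: t) (0 : Int)
          (PySem.List.pySetD (PySem.List.pyGetD (x :: t) (0 : Int) []) c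
            (PySem.List.pyGetD (v :: w) (0 : Int) 0))
          = PySem.List.pySetD x c v :: t := by
        simp [PySem.List.pySetD_of_nonneg, PySem.List.pyGetD_zero_cons]
      rw [step0, foldl_keep_head c v w (List.range t.length) (PySem.List.pySetD x c v) t,
        List.zip_cons_cons, List.map_cons]
      have ihw := ih w (by simp only [List.length_cons] at h; omega)
      rw [PySem.List.pyRange_one, List.foldl_map] at ihw
      simp only [Int.sub_zero, Int.toNat_natCast, Int.zero_add] at ihw
      rw [ihw]

-- The "+" branch of A builds exactly the rotated column column[-1] :: column[:-1].
lemma newcol_plus (cubo : List (List Int)) (c : Int) (h : cubo ≠ []) :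
    (PySem.List.pyRange 0 ((cubo.length : Int) - 1) 1).foldl
      (fun acc fila => acc ++ [PySem.List.pyGetD (PySem.List.pyGetD cubo fila []) c 0])
      [PySem.List.pyGetD (PySem.List.pyGetD cubo (-1) []) c 0]
    = PySem.List.pyGetD (cubo.map (fun row => PySem.List.pyGetD row c 0)) (-1) 0
      :: (cubo.map (fun row => PySem.List.pyGetD row c 0)).dropLast := by
  have hmap : cubo.map (fun row => PySem.List.pyGetD row c 0) ≠ [] := by
    simpa using h
  rw [PySem.List.foldl_append_singleton_eq_map,
    PySem.List.pyGetD_neg_one _ _ h, PySem.List.pyGetD_neg_one _ _ hmap,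
    PySem.List.pyRange_one, List.getLast_map]
  have hlen : 1 ≤ cubo.length := List.length_pos_iff.mpr h
  have htn : (((cubo.length : Int) - 1) - 0).toNat = cubo.length - 1 := by omega
  rw [htn, List.map_map]
  have hfun : ((fun fila => PySem.List.pyGetD (PySem.List.pyGetD cubo fila []) c 0) ∘
      (fun k : Nat => (0 : Int) + k)) = fun k : Nat =>
        PySem.List.pyGetD (cubo.getD k []) c 0 := by
    funext k
    simp only [Function.comp_apply, Int.zero_add, PySem.List.pyGetD_natCast]
  rw [hfun, map_getD_range (fun row => PySem.List.pyGetD row c 0) [] cubo _ (by omega),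
    List.dropLast_eq_take, List.length_map, ← List.map_take]
  rfl

-- The else branch of A builds exactly the rotated column column.tail ++ [column[0]].
lemma newcol_minus (cubo : List (List Int)) (c : Int) (h : cubo ≠ []) :
    ((PySem.List.pyRange 1 (cubo.length : Int) 1).foldl
      (fun acc fila => acc ++ [PySem.List.pyGetD (PySem.List.pyGetD cubo fila []) c 0]) [])
      ++ [PySem.List.pyGetD (PySem.List.pyGetD cubo 0 []) c 0]
    = (cubo.map (fun row => PySem.List.pyGetD row c 0)).tail
      ++ [PySem.List.pyGetD (cubo.map (fun row => PySem.List.pyGetD row c 0)) 0 0] := by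
  cases cubo with
  | nil => exact absurd rfl h
  | cons x t =>
    rw [PySem.List.foldl_append_singleton_eq_map, PySem.List.pyRange_one]
    have htn : ((((x :: t).length : Int)) - 1).toNat = t.length := by
      simp
    rw [htn, List.map_map]
    have hfun : ((fun fila => PySem.List.pyGetD (PySem.List.pyGetD (x :: t) fila []) c 0) ∘
        (fun k : Nat => (1 : Int) + k)) = fun k : Nat =>
          PySem.List.pyGetD (t.getD k []) c 0 := by
      funext k
      have hc : ((1 : Int) + (k : Int)) = ((k + 1 : Nat) : Int) := by push_cast; ring
      simp only [Function.comp_apply, hc, PySem.List.pyGetD_natCast, List.getD_cons_succ]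
    rw [hfun, map_getD_range (fun row => PySem.List.pyGetD row c 0) [] t _ (le_refl _),
      List.take_length]
    simp [PySem.List.pyGetD_zero_cons]

-- B's carry-swap pass is the zip write-back against carry :: column.
lemma foldl_carry (c : Int) :
    ∀ (xs : List (List Int)) (acc : List (List Int)) (carry : Int),
      (xs.foldl
        (fun (s : List (List Int) × Int) row =>
          (s.1 ++ [PySem.List.pySetD row c s.2], PySem.List.pyGetD row c 0)) (acc, carry)).1
      = acc ++ (xs.zip (carry :: xs.map (fun r => PySem.List.pyGetD r c 0))).map
          (fun p => PySem.List.pySetD p.1 c p.2) := by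
  intro xs
  induction xs with
  | nil => intro acc carry; simp
  | cons x t ih =>
    intro acc carry
    rw [List.foldl_cons]
    simp only [List.map_cons, List.zip_cons_cons, List.map_cons]
    rw [ih]
    simp [List.append_assoc]

-- Zip truncates its right argument to the left one's length.
lemma zip_take_right {α β : Type} :
    ∀ (xs : List α) (ys : List β), xs.zip (ys.take xs.length) = xs.zip ys := by
  intro xs
  induction xs with
  | nil => intro ys; simp
  | cons x t ih =>
    intro ys
    cases ys with
    | nil => simp
    | cons y w => simp [ih w]

-- Zipping against ys ++ [z] with |ys| = |xs| - 1 appends the pair (xs.getLast, z).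
lemma zip_append_last {α β : Type} :
    ∀ (xs : List α) (ys : List β) (z : β) (h : xs ≠ []), ys.length + 1 = xs.length →
      xs.zip (ys ++ [z]) = xs.zip ys ++ [(xs.getLast h, z)] := by
  intro xs
  induction xs with
  | nil => intro ys z h; exact absurd rfl h
  | cons x t ih =>
    intro ys z h hlen
    cases ys with
    | nil =>
      cases t with
      | nil => simp
      | cons a b => simp at hlen
    | cons y w =>
      cases t with
      | nil => simp at hlen
      | cons a b =>
        have := ih w z (by simp) (by simpa using hlen)
        simp only [List.cons_append, List.zip_cons_cons, this, List.getLast_cons_cons]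

-- ===== VERDICT (by name: the statement is the Claim_ definition above) =====
theorem mover_columnas_spec : Claim_equal_mover_columnas := by
  intro cubo col dir _ hpre
  obtain ⟨hne, _⟩ := hpre
  have hlen : 1 ≤ cubo.length := List.length_pos_iff.mpr hne
  have hmapne : cubo.map (fun row => PySem.List.pyGetD row (col - 1) 0) ≠ [] := by
    simpa using hne
  unfold Spec_mover_columnas
  by_cases hdir : (dir == "+") = true
  · -- "+" branch
    simp only [mover_columnas, mover_columnas_alt, hdir, if_true]
    rw [newcol_plus cubo (col - 1) hne,
      writeback_eq_zip (col - 1) cubo _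
        (by simp [List.length_dropLast]; omega),
      foldl_carry (col - 1) cubo [] _, List.nil_append]
    -- truncate the right zip argument: carry :: column  ↦  carry :: column.dropLast
    rw [← zip_take_right cubo
      (PySem.List.pyGetD (PySem.List.pyGetD cubo (-1) []) (col - 1) 0
        :: cubo.map (fun r => PySem.List.pyGetD r (col - 1) 0))]
    have hc : PySem.List.pyGetD (PySem.List.pyGetD cubo (-1) []) (col - 1) 0
        = PySem.List.pyGetD (cubo.map (fun row => PySem.List.pyGetD row (col - 1) 0)) (-1) 0 := by
      rw [PySem.List.pyGetD_neg_one _ _ hne, PySem.List.pyGetD_neg_one _ _ hmapne,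
        List.getLast_map]
    cases cubo with
    | nil => exact absurd rfl hne
    | cons x t =>
      simp only [List.length_cons, List.take_succ_cons] at *
      rw [hc]
      congr 2
      rw [List.dropLast_eq_take, List.length_map, List.length_cons, Nat.add_sub_cancel,
        ← List.map_take]
  · -- else branch
    simp only [mover_columnas, mover_columnas_alt, hdir, Bool.false_eq_true, if_false]
    rw [newcol_minus cubo (col - 1) hne,
      writeback_eq_zip (col - 1) cubo _
        (by simp [List.length_tail]; omega)]
    have htail : (cubo.map (fun row => PySem.List.pyGetD row (col - 1) 0)).tail
        = cubo.tail.map (fun row => PySem.List.pyGetD row (col - 1) 0) := by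
      cases cubo <;> simp
    rw [zip_append_last cubo _ _ hne
      (by simp [List.length_tail]; omega), List.map_append, List.map_singleton]
    rw [PySem.List.slice_from_one, htail]
    have hzr : cubo.zip (cubo.tail.map (fun row => PySem.List.pyGetD row (col - 1) 0))
        = (cubo.zip cubo.tail).map (Prod.map id (fun row => PySem.List.pyGetD row (col - 1) 0)) := by
      rw [List.zip_map_right]
    rw [hzr, List.map_map]
    have hlast : PySem.List.pyGetD cubo (-1) [] = cubo.getLast hne :=
      PySem.List.pyGetD_neg_one _ _ hne
    have hfirst : PySem.List.pyGetD (cubo.map (fun row => PySem.List.pyGetD row (col - 1) 0)) 0 0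
        = PySem.List.pyGetD (PySem.List.pyGetD cubo 0 []) (col - 1) 0 := by
      cases cubo with
      | nil => exact absurd rfl hne
      | cons x t => simp [PySem.List.pyGetD_zero_cons]
    rw [hlast, hfirst]
    rfl
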